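-- pv_equiv track=rewrite | github.com/trevolcanm10/juego_morris | src/logica_juego.py | _molinos_por_punto
-- ===== SOURCE A (Python) =====
-- def _molinos_por_punto(punto: int):
--     molinos = [
--         # Horizontales
--         [0, 1, 2],     [3, 4, 5],     [6, 7, 8],
--         [9, 10, 11],   [12, 13, 14], [15, 16, 17],
--         [18, 19, 20],  [21, 22, 23],
--
--         # Verticales
--         [0, 9, 21],    [3, 10, 18],   [6, 11, 15],
--         [1, 4, 7],     [16, 19, 22],
--         [8, 12, 17],   [5, 13, 20],   [2, 14, 23]
--     ]
--
--     return [m for m in molinos if punto in m]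
-- ===== SOURCE B (Python) =====
-- # Closed-form lookup table: each point maps directly to its two mills.
-- _TABLA = {
--     0: [[0, 1, 2], [0, 9, 21]],
--     1: [[0, 1, 2], [1, 4, 7]],
--     2: [[0, 1, 2], [2, 14, 23]],
--     3: [[3, 4, 5], [3, 10, 18]],
--     4: [[3, 4, 5], [1, 4, 7]],
--     5: [[3, 4, 5], [5, 13, 20]],
--     6: [[6, 7, 8], [6, 11, 15]],
--     7: [[6, 7, 8], [1, 4, 7]],
--     8: [[6, 7, 8], [8, 12, 17]],
--     9: [[9, 10, 11], [0, 9, 21]],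
--     10: [[9, 10, 11], [3, 10, 18]],
--     11: [[9, 10, 11], [6, 11, 15]],
--     12: [[12, 13, 14], [8, 12, 17]],
--     13: [[12, 13, 14], [5, 13, 20]],
--     14: [[12, 13, 14], [2, 14, 23]],
--     15: [[15, 16, 17], [6, 11, 15]],
--     16: [[15, 16, 17], [16, 19, 22]],
--     17: [[15, 16, 17], [8, 12, 17]],
--     18: [[18, 19, 20], [3, 10, 18]],
--     19: [[18, 19, 20], [16, 19, 22]],
--     20: [[18, 19, 20], [5, 13, 20]],
--     21: [[21, 22, 23], [0, 9, 21]],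
--     22: [[21, 22, 23], [16, 19, 22]],
--     23: [[21, 22, 23], [2, 14, 23]],
-- }
--
--
-- def _molinos_por_punto(punto: int):
--     return _TABLA.get(punto, [])
-- ===== Notes on version B (the rewrite author's own statement) =====
-- stated objective: alternative
-- what changed: Replaces the per-call membership scan over the fixed mill list with a precomputed closed-form table mapping each point directly to its mills, so a call is a single dict lookup with no scan.
import Mathlib
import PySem

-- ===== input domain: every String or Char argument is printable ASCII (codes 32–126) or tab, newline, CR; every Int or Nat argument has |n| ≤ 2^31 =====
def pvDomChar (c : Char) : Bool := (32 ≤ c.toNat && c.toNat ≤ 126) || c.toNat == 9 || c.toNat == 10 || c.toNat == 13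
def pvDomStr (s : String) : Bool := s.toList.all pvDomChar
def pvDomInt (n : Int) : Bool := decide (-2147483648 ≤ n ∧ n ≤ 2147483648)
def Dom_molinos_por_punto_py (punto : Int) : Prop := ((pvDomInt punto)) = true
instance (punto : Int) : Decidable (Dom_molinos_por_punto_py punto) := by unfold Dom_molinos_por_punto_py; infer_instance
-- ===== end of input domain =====

-- B replaces A's per-call membership scan over the mill list with a precomputed closed-form point→mills table and a single lookup (alternative decomposition; same results).


-- ===== PORT A =====
def pvMolinos : List (List Int) := [
    [0, 1, 2],     [3, 4, 5],     [6, 7, 8],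
    [9, 10, 11],   [12, 13, 14],  [15, 16, 17],
    [18, 19, 20],  [21, 22, 23],
    [0, 9, 21],    [3, 10, 18],   [6, 11, 15],
    [1, 4, 7],     [16, 19, 22],
    [8, 12, 17],   [5, 13, 20],   [2, 14, 23]]

def molinos_por_punto_py (punto : Int) : List (List Int) :=
  pvMolinos.filter (fun m => punto ∈ m)

-- ===== PORT B =====
-- Source B's literal dict table, ported as a PySem.Dict literal; the call is _TABLA.get(punto, []).
def pvTabla : PySem.Dict Int (List (List Int)) := PySem.Dict.ofList [
  (0,  [[0, 1, 2], [0, 9, 21]]),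
  (1,  [[0, 1, 2], [1, 4, 7]]),
  (2,  [[0, 1, 2], [2, 14, 23]]),
  (3,  [[3, 4, 5], [3, 10, 18]]),
  (4,  [[3, 4, 5], [1, 4, 7]]),
  (5,  [[3, 4, 5], [5, 13, 20]]),
  (6,  [[6, 7, 8], [6, 11, 15]]),
  (7,  [[6, 7, 8], [1, 4, 7]]),
  (8,  [[6, 7, 8], [8, 12, 17]]),
  (9,  [[9, 10, 11], [0, 9, 21]]),
  (10, [[9, 10, 11], [3, 10, 18]]),
  (11, [[9, 10, 11], [6, 11, 15]]),
  (12, [[12, 13, 14], [8, 12, 17]]),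
  (13, [[12, 13, 14], [5, 13, 20]]),
  (14, [[12, 13, 14], [2, 14, 23]]),
  (15, [[15, 16, 17], [6, 11, 15]]),
  (16, [[15, 16, 17], [16, 19, 22]]),
  (17, [[15, 16, 17], [8, 12, 17]]),
  (18, [[18, 19, 20], [3, 10, 18]]),
  (19, [[18, 19, 20], [16, 19, 22]]),
  (20, [[18, 19, 20], [5, 13, 20]]),
  (21, [[21, 22, 23], [0, 9, 21]]),
  (22, [[21, 22, 23], [16, 19, 22]]),
  (23, [[21, 22, 23], [2, 14, 23]])]

def molinos_por_punto_py_alt (punto : Int) : List (List Int) :=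
  pvTabla.getD punto []

-- ===== PRECONDITION & SPEC =====
def Spec_molinos_por_punto_py (punto : Int) (out : List (List Int)) : Prop := out = molinos_por_punto_py_alt punto
instance (punto : Int) (out : List (List Int)) : Decidable (Spec_molinos_por_punto_py punto out) := by unfold Spec_molinos_por_punto_py; infer_instance

-- ===== CLAIM (what is proved, stated in full; the proofs are below) =====
def Claim_equal_molinos_por_punto_py : Prop := ∀ (punto : Int), Dom_molinos_por_punto_py punto → Spec_molinos_por_punto_py punto (molinos_por_punto_py punto)

-- ===== LEMMAS AND PROOFS =====

-- every point of every mill is one of 0..23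
lemma pvPoints_mem : ∀ m ∈ pvMolinos, ∀ p ∈ m, p ∈ ([0,1,2,3,4,5,6,7,8,9,10,11,12,13,14,15,16,17,18,19,20,21,22,23] : List Int) := by
  decide

set_option maxRecDepth 8000 in
lemma pvMain (punto : Int) :
    molinos_por_punto_py punto = molinos_por_punto_py_alt punto := by
  by_cases h : punto ∈ ([0,1,2,3,4,5,6,7,8,9,10,11,12,13,14,15,16,17,18,19,20,21,22,23] : List Int)
  · fin_cases h <;> rfl
  · have hA : molinos_por_punto_py punto = [] := by
      unfold molinos_por_punto_py
      rw [List.filter_eq_nil_iff]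
      intro m hm
      simp only [decide_eq_true_eq]
      intro hp
      exact h (pvPoints_mem m hm punto hp)
    have hB : molinos_por_punto_py_alt punto = [] := by
      unfold molinos_por_punto_py_alt
      simp only [List.mem_cons, List.not_mem_nil, or_false] at h
      push Not at h
      obtain ⟨h0,h1,h2,h3,h4,h5,h6,h7,h8,h9,h10,h11,h12,h13,h14,h15,h16,h17,h18,h19,h20,h21,h22,h23⟩ := h
      simp [pvTabla, PySem.Dict.ofList, PySem.Dict.update, PySem.Dict.getD_insert,
        h0,h1,h2,h3,h4,h5,h6,h7,h8,h9,h10,h11,h12,h13,h14,h15,h16,h17,h18,h19,h20,h21,h22,h23]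
    rw [hA, hB]

-- ===== VERDICT (by name: the statement is the Claim_ definition above) =====
theorem molinos_por_punto_py_spec : Claim_equal_molinos_por_punto_py := by
  intro punto _
  exact pvMain punto
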